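-- pv_equiv track=rewrite | github.com/jolitti/adventofcode | 2023/day13.py | mirror_pos
-- ===== SOURCE A (Python) =====
-- def eq_pairs(chunk) -> set[int] | None:
--     ans = set()
--     for i,(s1,s2) in enumerate(zip(chunk,chunk[1:])):
--         if s1 == s2: ans.add(i)
--     return ans
--
-- def mirror_pos(chunk) -> set[int]:
--     candidates = eq_pairs(chunk)
--     if not candidates: return set()
--     ans = set()
--     for p in candidates:
--         if all(a==b for a,b in zip(chunk[p::-1],chunk[p+1:])):
--             ans.add(p)
--     return ans
-- ===== SOURCE B (Python) =====
-- def mirror_pos(chunk) -> set[int]: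
--     # Elimination: a mirror at gap p pairs indices i and j with i + j = 2p + 1.
--     # Scan all odd-distance index pairs once; each mismatching pair rules out its
--     # unique center (i + j) // 2.  Surviving gaps in range(n - 1) are the answer.
--     n = len(chunk)
--     bad = set()
--     for i in range(n):
--         for j in range(i + 1, n):
--             if (j - i) % 2 == 1 and chunk[i] != chunk[j]:
--                 bad.add((i + j) // 2)
--     return {p for p in range(n - 1) if p not in bad}
-- ===== Notes on version B (the rewrite author's own statement) =====
-- stated objective: alternative
-- what changed: A collects candidate gaps with equal adjacent rows and verifies each by expanding outward with a reversed-slice/suffix zip; B never verifies a center: it scans all odd-distance index pairs once, eliminates the unique center (i+j)//2 of every mismatching pair, and returns the surviving gaps of range(n-1).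
import Mathlib
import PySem

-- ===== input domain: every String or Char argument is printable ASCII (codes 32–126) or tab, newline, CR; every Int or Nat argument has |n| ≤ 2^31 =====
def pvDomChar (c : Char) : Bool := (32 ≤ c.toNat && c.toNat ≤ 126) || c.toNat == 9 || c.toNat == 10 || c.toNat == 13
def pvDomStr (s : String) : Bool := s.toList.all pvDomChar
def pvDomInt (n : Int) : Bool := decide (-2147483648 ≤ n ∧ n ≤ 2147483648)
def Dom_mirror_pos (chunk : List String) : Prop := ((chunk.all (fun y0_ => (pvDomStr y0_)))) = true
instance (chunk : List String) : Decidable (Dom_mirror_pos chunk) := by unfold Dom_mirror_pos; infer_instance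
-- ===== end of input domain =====

-- B replaces A's candidate-then-verify expansion by a center-elimination pass: every
-- mismatching odd-distance index pair rules out its unique center, and the surviving gaps
-- are returned (alternative algorithm, same worst-case cost; equality proved below).


-- ===== PORT A =====
-- eq_pairs: for i,(s1,s2) in enumerate(zip(chunk, chunk[1:])): if s1 == s2: ans.add(i)
def eq_pairs (chunk : List String) : PySem.Set Int :=
  (PySem.List.enumerate (List.zip chunk (PySem.List.slice chunk (some 1) none))).foldl
    (fun ans e => if e.2.1 == e.2.2 then PySem.Set.add ans e.1 else ans) PySem.Set.empty

-- all(a==b for a,b in zip(chunk[p::-1], chunk[p+1:])); chunk[p::-1] via slice? (step -1)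
def mirrorCheckA (chunk : List String) (p : Int) : Bool :=
  (List.zip ((PySem.List.slice? chunk (some p) none (-1)).getD [])
            (PySem.List.slice chunk (some (p + 1)) none)).all (fun ab => ab.1 == ab.2)

def mirror_pos (chunk : List String) : List Int :=
  let candidates := eq_pairs chunk
  if candidates = [] then PySem.Set.empty
  else candidates.foldl
    (fun ans p => if mirrorCheckA chunk p then PySem.Set.add ans p else ans) PySem.Set.empty

-- ===== PORT B =====
-- the nested loop building `bad`: for i in range(n): for j in range(i+1, n):
--   if (j - i) % 2 == 1 and chunk[i] != chunk[j]: bad.add((i + j) // 2)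
def pvBad (chunk : List String) (n : Int) : PySem.Set Int :=
  (PySem.List.pyRange 0 n 1).foldl
    (fun bad i =>
      (PySem.List.pyRange (i + 1) n 1).foldl
        (fun bad j =>
          if PySem.Int.mod (j - i) 2 == 1
              && PySem.List.pyGetD chunk i "" != PySem.List.pyGetD chunk j "" then
            PySem.Set.add bad (PySem.Int.floordiv (i + j) 2)
          else bad)
        bad)
    PySem.Set.empty

-- {p for p in range(n - 1) if p not in bad}
def mirror_pos_alt (chunk : List String) : List Int :=
  let n : Int := (chunk.length : Int)
  let bad := pvBad chunk n
  (PySem.List.pyRange 0 (n - 1) 1).foldl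
    (fun ans p => if !(PySem.Set.contains bad p) then PySem.Set.add ans p else ans)
    PySem.Set.empty

-- ===== PRECONDITION & SPEC =====
def Spec_mirror_pos (chunk : List String) (out : List Int) : Prop := out = mirror_pos_alt chunk
instance (chunk : List String) (out : List Int) : Decidable (Spec_mirror_pos chunk out) := by unfold Spec_mirror_pos; infer_instance

-- ===== CLAIM (what is proved, stated in full; the proofs are below) =====
def Claim_equal_mirror_pos : Prop := ∀ (chunk : List String), Dom_mirror_pos chunk → Spec_mirror_pos chunk (mirror_pos chunk)

-- ===== LEMMAS AND PROOFS =====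

-- Folding `if q x then Set.add acc (f x)` over a list whose selected images are fresh appends them.
theorem foldl_add_filter {α β : Type} [BEq β] [LawfulBEq β] (l : List α) (q : α → Bool) (f : α → β)
    (acc : List β) (h : (acc ++ (l.filter q).map f).Nodup) :
    l.foldl (fun s x => if q x then PySem.Set.add s (f x) else s) acc
      = acc ++ (l.filter q).map f := by
  induction l generalizing acc with
  | nil => simp
  | cons x t ih =>
    by_cases hq : q x = true
    · simp only [List.foldl_cons, hq, if_pos]
      have hfx : f x ∉ acc := by
        intro hmem
        have : (acc ++ (f x :: (t.filter q).map f)).Nodup := by simpa [hq] using h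
        exact (List.disjoint_of_nodup_append this) hmem (by simp)
      have hadd : PySem.Set.add acc (f x) = acc ++ [f x] := by
        simp [PySem.Set.add, PySem.Set.contains, hfx]
      rw [hadd, ih (acc ++ [f x]) (by simpa [hq] using h)]
      simp [hq]
    · simp only [List.foldl_cons, hq, if_neg, Bool.false_eq_true, not_false_iff]
      rw [ih acc (by simpa [hq] using h)]
      simp [hq]

-- membership in a fold whose step adds elements described by P
theorem mem_foldl_step {α : Type} (g : List Int → α → List Int) (P : α → Int → Prop)
    (hg : ∀ s e x, x ∈ g s e ↔ x ∈ s ∨ P e x) (l : List α) (s : List Int) (x : Int) :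
    x ∈ l.foldl g s ↔ x ∈ s ∨ ∃ e ∈ l, P e x := by
  induction l generalizing s with
  | nil => simp
  | cons a t ih =>
    rw [List.foldl_cons, ih, hg]
    simp only [List.exists_mem_cons_iff]
    tauto

-- membership in the mapped-filtered enumeration
theorem mem_enum_filter_map {α : Type} (zs : List α) (Q : Int × α → Bool) (s p : Int) :
    (p ∈ ((PySem.List.enumerate zs s).filter Q).map (·.1)) ↔
      ∃ (k : Nat) (hk : k < zs.length), p = s + k ∧ Q (s + k, zs[k]) = true := by
  induction zs generalizing s with
  | nil => simp [PySem.List.enumerate]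
  | cons x t ih =>
    rw [PySem.List.enumerate_cons]
    by_cases hx : Q (s, x) = true
    · simp only [List.filter_cons, hx, if_pos, List.map_cons, List.mem_cons, ih]
      constructor
      · rintro (rfl | ⟨k, hk, rfl, hP⟩)
        · exact ⟨0, by simp, by simp, by simpa⟩
        · refine ⟨k+1, by simpa using hk, by push_cast; ring, ?_⟩
          rw [show s + ((k + 1 : Nat) : Int) = s + 1 + k by push_cast; ring, List.getElem_cons_succ]
          exact hP
      · rintro ⟨k, hk, rfl, hP⟩
        cases k with
        | zero => left; simp
        | succ k =>
          right
          refine ⟨k, by simpa using hk, by push_cast; ring, ?_⟩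
          rw [show s + 1 + (k : Int) = s + ((k + 1 : Nat) : Int) by push_cast; ring]
          simpa using hP
    · have hx' : Q (s, x) = false := by simpa using hx
      simp only [List.filter_cons, hx', Bool.false_eq_true, if_neg, not_false_iff, ih]
      constructor
      · rintro ⟨k, hk, rfl, hP⟩
        refine ⟨k+1, by simpa using hk, by push_cast; ring, ?_⟩
        rw [show s + ((k + 1 : Nat) : Int) = s + 1 + k by push_cast; ring, List.getElem_cons_succ]
        exact hP
      · rintro ⟨k, hk, rfl, hP⟩
        cases k with
        | zero => rw [show s + ((0 : Nat) : Int) = s by simp] at hP; simp at hP; rw [hP] at hx'; simp at hx'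
        | succ k =>
          refine ⟨k, by simpa using hk, by push_cast; ring, ?_⟩
          rw [show s + 1 + (k : Int) = s + ((k + 1 : Nat) : Int) by push_cast; ring]
          simpa using hP

-- the first components of the filtered enumeration are strictly increasing
theorem pairwise_enum_filter_map {α : Type} (zs : List α) (Q : Int × α → Bool) (s : Int) :
    (((PySem.List.enumerate zs s).filter Q).map (·.1)).Pairwise (· < ·) := by
  have hsub : (((PySem.List.enumerate zs s).filter Q).map (·.1)).Sublist
      ((PySem.List.enumerate zs s).map (·.1)) :=
    List.Sublist.map _ List.filter_sublist
  have : ((PySem.List.enumerate zs s).map (·.1)).Pairwise (· < ·) := by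
    rw [PySem.List.map_fst_enumerate]
    exact PySem.List.pairwise_lt_pyRange_one _ _
  exact this.sublist hsub

theorem filterMap_rev (xs : List String) (k : Nat) (hk : k < xs.length) :
    (List.range (k+1)).filterMap (fun j => xs[(k - j : Nat)]?) = (xs.take (k+1)).reverse := by
  induction k with
  | zero =>
    simp [List.getElem?_eq_getElem hk, List.take_add_one, List.take_zero]
  | succ k ih =>
    rw [List.range_succ_eq_map, List.filterMap_cons, List.filterMap_map]
    have h1 : xs[(k + 1 - 0 : Nat)]? = some xs[k+1] := by
      simp [List.getElem?_eq_getElem hk]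
    have h2 : ((List.range (k+1)).filterMap ((fun j => xs[(k + 1 - j : Nat)]?) ∘ Nat.succ))
        = (xs.take (k+1)).reverse := by
      rw [List.filterMap_congr (g := fun j => xs[(k - j : Nat)]?) ?_]
      · exact ih (by omega)
      · intro a _; simp [Function.comp, Nat.succ_sub_succ]
    rw [h2]
    have hk' : k < xs.length := by omega
    have h3 : List.take (k+1+1) xs = List.take (k+1) xs ++ [xs[k+1]] := by
      rw [List.take_add_one]; simp [List.getElem?_eq_getElem hk]
    rw [h3, List.reverse_append]; simp [List.getElem?_eq_getElem hk]

-- chunk[p::-1] for 0 ≤ p < len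
theorem slice?_from_neg_one_eq (xs : List String) (p : Int) (h0 : 0 ≤ p) (hl : p < xs.length) :
    PySem.List.slice? xs (some p) none (-1) = some ((xs.take (p.toNat + 1)).reverse) := by
  obtain ⟨k, rfl⟩ : ∃ k : Nat, p = (k : Int) := ⟨p.toNat, (Int.toNat_of_nonneg h0).symm⟩
  unfold PySem.List.slice? PySem.List.sliceIndices
  have hk : k < xs.length := by exact_mod_cast hl
  have hmin : min (k : Int) ((xs.length : Int) - 1) = (k : Int) := by omega
  simp only [if_neg (show ¬((-1 : Int) = 0) by norm_num)]
  norm_num [hmin]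
  rw [if_neg (show ¬ ((k:Int) < 0) by omega), if_pos (show (-1:Int) < (k:Int) by omega)]
  rw [show ((k:Int) + 1).toNat = k + 1 by omega]
  rw [List.filterMap_congr (g := fun j => xs[(k - j : Nat)]?) ?_]
  · exact filterMap_rev xs k hk
  · intro a ha
    simp only [List.mem_range] at ha
    congr 1
    omega

-- elementwise reading of the zip-all check
theorem zip_all_iff {α : Type} [BEq α] [LawfulBEq α] (l r : List α) :
    ((List.zip l r).all (fun ab => ab.1 == ab.2) = true) ↔
      ∀ t (ht : t < l.length) (ht' : t < r.length), l[t] = r[t] := by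
  rw [List.all_eq_true]
  constructor
  · intro h t ht ht'
    have hm : (l[t], r[t]) ∈ List.zip l r := by
      have hgz : (List.zip l r)[t]'(by rw [List.length_zip]; omega) = (l[t], r[t]) :=
        List.getElem_zip
      rw [← hgz]; exact List.getElem_mem _
    simpa using h _ hm
  · intro h ab hab
    obtain ⟨t, htz, heq⟩ := List.mem_iff_getElem.mp hab
    rw [List.getElem_zip] at heq
    rw [List.length_zip] at htz
    subst heq
    simpa using h t (by omega) (by omega)

theorem getD_nat (chunk : List String) (m : Nat) (h : m < chunk.length) :
    PySem.List.pyGetD chunk (m : Int) "" = chunk[m] := by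
  simp [PySem.List.pyGetD_natCast, List.getD_eq_getElem?_getD, List.getElem?_eq_getElem h]

-- the mirror property at gap k
def MirrorProp (chunk : List String) (k : Nat) : Prop :=
  ∀ t : Nat, t ≤ k → ∀ h2 : k + 1 + t < chunk.length,
    chunk[k - t]'(by omega) = chunk[k + 1 + t]'h2

theorem mirrorCheckA_iff (chunk : List String) (k : Nat) (hk : k + 1 < chunk.length) :
    mirrorCheckA chunk (k : Int) = true ↔ MirrorProp chunk k := by
  unfold mirrorCheckA
  rw [slice?_from_neg_one_eq chunk k (by omega) (by exact_mod_cast Nat.lt_of_succ_lt hk)]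
  rw [show ((k : Int) + 1) = ((k + 1 : Nat) : Int) by push_cast; ring,
    PySem.List.slice_from_natCast, Int.toNat_natCast]
  simp only [Option.getD_some]
  rw [zip_all_iff]
  unfold MirrorProp
  constructor
  · intro h t ht1 ht2
    have h1 : t < ((chunk.take (k+1)).reverse).length := by simp; omega
    have h2 : t < (chunk.drop (k+1)).length := by simp; omega
    have := h t h1 h2
    simp only [List.getElem_reverse, List.getElem_take, List.getElem_drop,
      List.length_take] at this
    have hidx : min (k+1) chunk.length - 1 - t = k - t := by omega
    simpa [hidx] using this
  · intro h t h1 h2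
    simp only [List.length_reverse, List.length_take, List.length_drop] at h1 h2
    simp only [List.getElem_reverse, List.getElem_take, List.getElem_drop, List.length_take]
    have hidx : min (k+1) chunk.length - 1 - t = k - t := by omega
    simp only [hidx]
    exact h t (by omega) (by omega)

-- membership in B's bad set
theorem mem_pvBad (chunk : List String) (x : Int) :
    x ∈ pvBad chunk (chunk.length : Int) ↔
      ∃ i j : Int, 0 ≤ i ∧ i < j ∧ j < (chunk.length : Int) ∧
        PySem.Int.mod (j - i) 2 = 1 ∧
        PySem.List.pyGetD chunk i "" ≠ PySem.List.pyGetD chunk j "" ∧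
        x = PySem.Int.floordiv (i + j) 2 := by
  unfold pvBad
  rw [mem_foldl_step _
    (fun i x => ∃ j : Int, i < j ∧ j < (chunk.length : Int) ∧
        PySem.Int.mod (j - i) 2 = 1 ∧
        PySem.List.pyGetD chunk i "" ≠ PySem.List.pyGetD chunk j "" ∧
        x = PySem.Int.floordiv (i + j) 2) ?_]
  · simp only [PySem.Set.empty, List.not_mem_nil, false_or]
    constructor
    · rintro ⟨i, hi, j, hj⟩
      rw [PySem.List.mem_pyRange_one] at hi
      exact ⟨i, j, hi.1, hj⟩
    · rintro ⟨i, j, h0, hij⟩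
      refine ⟨i, ?_, j, hij⟩
      rw [PySem.List.mem_pyRange_one]
      exact ⟨h0, by omega⟩
  · intro s i x
    rw [mem_foldl_step _
      (fun j x => PySem.Int.mod (j - i) 2 = 1 ∧
        PySem.List.pyGetD chunk i "" ≠ PySem.List.pyGetD chunk j "" ∧
        x = PySem.Int.floordiv (i + j) 2) ?_]
    · constructor
      · rintro (hs | ⟨j, hj, hc⟩)
        · exact Or.inl hs
        · rw [PySem.List.mem_pyRange_one] at hj
          exact Or.inr ⟨j, by omega, by omega, hc⟩
      · rintro (hs | ⟨j, h1, h2, hc⟩)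
        · exact Or.inl hs
        · exact Or.inr ⟨j, by rw [PySem.List.mem_pyRange_one]; omega, hc⟩
    · intro s j x
      split_ifs with hq
      · rw [PySem.Set.mem_add]
        simp only [Bool.and_eq_true, beq_iff_eq, bne_iff_ne, ne_eq] at hq
        constructor
        · rintro (hs | rfl)
          · exact Or.inl hs
          · exact Or.inr ⟨hq.1, hq.2, rfl⟩
        · rintro (hs | ⟨_, _, rfl⟩)
          · exact Or.inl hs
          · exact Or.inr rfl
      · simp only [Bool.and_eq_true, beq_iff_eq, bne_iff_ne, ne_eq, not_and] at hq
        constructor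
        · exact Or.inl
        · rintro (hs | ⟨h1, h2, _⟩)
          · exact hs
          · exact absurd h2 (by simpa using hq h1)

-- not-bad at a gap is exactly the mirror property
theorem not_bad_iff (chunk : List String) (k : Nat) (hk : k + 1 < chunk.length) :
    (k : Int) ∉ pvBad chunk (chunk.length : Int) ↔ MirrorProp chunk k := by
  rw [mem_pvBad]
  constructor
  · intro h t ht1 ht2
    by_contra hne
    apply h
    refine ⟨((k - t : Nat) : Int), ((k + 1 + t : Nat) : Int), by omega, by omega,
      by exact_mod_cast ht2, ?_, ?_, ?_⟩
    · have he : ((k + 1 + t : Nat) : Int) - ((k - t : Nat) : Int) = 2 * t + 1 := by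
        push_cast; omega
      rw [he, PySem.Int.mod_eq_emod_of_pos (by norm_num)]
      omega
    · rw [getD_nat _ _ (by omega), getD_nat _ _ (by omega)]
      exact hne
    · have he : ((k - t : Nat) : Int) + ((k + 1 + t : Nat) : Int) = 2 * k + 1 := by
        push_cast; omega
      rw [he, PySem.Int.floordiv_eq_ediv_of_pos (by norm_num)]
      omega
  · rintro h ⟨i, j, h0, hij, hjn, hmod, hne, hx⟩
    rw [PySem.Int.mod_eq_emod_of_pos (by norm_num)] at hmod
    rw [PySem.Int.floordiv_eq_ediv_of_pos (by norm_num)] at hx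
    have hsum : i + j = 2 * k + 1 := by omega
    have hjk : (k : Int) + 1 ≤ j := by omega
    set t : Nat := (j - ((k : Int) + 1)).toNat with htdef
    have hjt : j = ((k + 1 + t : Nat) : Int) := by omega
    have hit : i = ((k - t : Nat) : Int) := by omega
    have ht1 : t ≤ k := by omega
    have ht2 : k + 1 + t < chunk.length := by
      have : j < (chunk.length : Int) := hjn
      omega
    apply hne
    rw [hit, hjt, getD_nat _ _ (by omega), getD_nat _ _ ht2]
    exact h t ht1 ht2

theorem candidates_eq (chunk : List String) :
    eq_pairs chunk =
      (((PySem.List.enumerate (List.zip chunk chunk.tail) 0).filter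
          (fun e => e.2.1 == e.2.2)).map (·.1)) := by
  unfold eq_pairs
  rw [PySem.List.slice_from_one]
  exact foldl_add_filter _ _ _ [] (by simpa using (pairwise_enum_filter_map (List.zip chunk chunk.tail) (fun e => e.2.1 == e.2.2) 0).nodup)

theorem nodup_candidates (chunk : List String) : (eq_pairs chunk).Nodup := by
  rw [candidates_eq]
  exact (pairwise_enum_filter_map _ _ _).nodup

theorem mirror_pos_eq_filter (chunk : List String) :
    mirror_pos chunk = (eq_pairs chunk).filter (mirrorCheckA chunk) := by
  unfold mirror_pos
  by_cases h : eq_pairs chunk = []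
  · simp [h, PySem.Set.empty]
  · simp only [h, if_neg, not_false_iff]
    have := foldl_add_filter (eq_pairs chunk) (mirrorCheckA chunk) (fun x => x) []
      (by simpa using ((nodup_candidates chunk).sublist (by exact List.filter_sublist) : ((eq_pairs chunk).filter (mirrorCheckA chunk)).Nodup))
    simpa using this

theorem mirror_pos_alt_eq_filter (chunk : List String) :
    mirror_pos_alt chunk =
      (PySem.List.pyRange 0 ((chunk.length : Int) - 1) 1).filter
        (fun p => !(PySem.Set.contains (pvBad chunk (chunk.length : Int)) p)) := by
  unfold mirror_pos_alt
  have := foldl_add_filter (PySem.List.pyRange 0 ((chunk.length : Int) - 1) 1)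
    (fun p => !(PySem.Set.contains (pvBad chunk (chunk.length : Int)) p)) (fun x => x) []
    (by simpa using ((PySem.List.nodup_pyRange_one 0 ((chunk.length : Int) - 1)).sublist List.filter_sublist))
  simpa using this

theorem sorted_eq_of_mem_iff {l1 l2 : List Int} (h1 : l1.Pairwise (· < ·))
    (h2 : l2.Pairwise (· < ·)) (h : ∀ x, x ∈ l1 ↔ x ∈ l2) : l1 = l2 := by
  have p : List.Perm l1 l2 := by
    apply List.perm_of_nodup_nodup_toFinset_eq (h1.nodup) (h2.nodup)
    ext x; simp [List.mem_toFinset, h]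
  exact p.eq_of_pairwise (fun a b _ _ hab hba => absurd hba (not_lt.mpr hab.le)) h1 h2

-- ===== VERDICT (by name: the statement is the Claim_ definition above) =====
theorem mirror_pos_spec : Claim_equal_mirror_pos := by
  intro chunk _
  unfold Spec_mirror_pos
  rw [mirror_pos_eq_filter, mirror_pos_alt_eq_filter]
  apply sorted_eq_of_mem_iff
  · exact (by rw [candidates_eq]; exact pairwise_enum_filter_map _ _ _ : (eq_pairs chunk).Pairwise (· < ·)).sublist List.filter_sublist
  · exact (PySem.List.pairwise_lt_pyRange_one _ _).sublist List.filter_sublist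
  · intro x
    rw [List.mem_filter, List.mem_filter, candidates_eq, mem_enum_filter_map,
      PySem.List.mem_pyRange_one]
    have hzlen : (List.zip chunk chunk.tail).length = chunk.length - 1 := by
      rw [List.length_zip, List.length_tail]; omega
    have hcontains : ∀ y : Int,
        (!(PySem.Set.contains (pvBad chunk (chunk.length : Int)) y)) = true ↔
          y ∉ pvBad chunk (chunk.length : Int) := by
      intro y
      simp [PySem.Set.contains]
    constructor
    · rintro ⟨⟨k, hk, rfl, hP⟩, hchk⟩
      rw [hzlen] at hk
      have hklt : k + 1 < chunk.length := by omega
      refine ⟨⟨by omega, by omega⟩, ?_⟩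
      rw [show (0 : Int) + (k : Int) = (k : Int) by omega] at hchk ⊢
      rw [hcontains, not_bad_iff chunk k hklt]
      exact (mirrorCheckA_iff chunk k hklt).mp hchk
    · rintro ⟨⟨hx0, hxlt⟩, hq⟩
      obtain ⟨k, rfl⟩ : ∃ k : Nat, x = (k : Int) := ⟨x.toNat, (Int.toNat_of_nonneg hx0).symm⟩
      have hklt : k + 1 < chunk.length := by omega
      rw [hcontains, not_bad_iff chunk k hklt] at hq
      refine ⟨⟨k, by rw [hzlen]; omega, by omega, ?_⟩, ?_⟩
      · have hget : (List.zip chunk chunk.tail)[k]'(by rw [hzlen]; omega)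
            = (chunk[k]'(by omega), chunk[k+1]'(hklt)) := by
          rw [List.getElem_zip, List.getElem_tail]
        rw [hget]
        simp only [beq_iff_eq]
        have := hq 0 (by omega) (by omega)
        simpa using this
      · exact (mirrorCheckA_iff chunk k hklt).mpr hq
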